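-- pv_equiv track=rewrite | github.com/ecomhub200/Douglas_County_2 | scripts/ranking_validation.py | compute_metrics_by_fips
-- ===== SOURCE A (Python) =====
-- from collections import defaultdict
--
-- _TRUTHY = {"Y", "YES", "1", "TRUE", "True", "true"}
--
-- def compute_metrics_by_fips(rows):
--     """
--     Compute 5 crash metrics grouped by FIPS.
--
--     Returns: {fips: {total_crash: N, total_ped_crash: N, ...}}
--     """
--     by_fips = defaultdict(list)
--     for row in rows:
--         fips = row.get("FIPS", "").strip()
--         if fips:
--             by_fips[fips].append(row)
--
--     metrics = {}
--     for fips, fips_rows in by_fips.items():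
--         metrics[fips] = {
--             "total_crash": len(fips_rows),
--             "total_ped_crash": sum(
--                 1 for r in fips_rows if r.get("Pedestrian?", "") in _TRUTHY
--             ),
--             "total_bike_crash": sum(
--                 1 for r in fips_rows if r.get("Bike?", "") in _TRUTHY
--             ),
--             "total_fatal": sum(
--                 1 for r in fips_rows if r.get("Crash Severity", "").upper() == "K"
--             ),
--             "total_fatal_serious_injury": sum(
--                 1
--                 for r in fips_rows
--                 if r.get("Crash Severity", "").upper() in ("K", "A")
--             ),
--         }
--
--     return metrics
-- ===== SOURCE B (Python) =====
-- _TRUTHY = {"Y", "YES", "1", "TRUE", "True", "true"}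
--
-- def compute_metrics_by_fips(rows):
--     """Single pass with running counters per FIPS (no grouping into row lists)."""
--     metrics = {}
--     for row in rows:
--         fips = row.get("FIPS", "").strip()
--         if not fips:
--             continue
--         m = metrics.get(fips)
--         if m is None:
--             m = {
--                 "total_crash": 0,
--                 "total_ped_crash": 0,
--                 "total_bike_crash": 0,
--                 "total_fatal": 0,
--                 "total_fatal_serious_injury": 0,
--             }
--             metrics[fips] = m
--         m["total_crash"] += 1
--         if row.get("Pedestrian?", "") in _TRUTHY:
--             m["total_ped_crash"] += 1
--         if row.get("Bike?", "") in _TRUTHY: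
--             m["total_bike_crash"] += 1
--         sev = row.get("Crash Severity", "").upper()
--         if sev == "K":
--             m["total_fatal"] += 1
--         if sev in ("K", "A"):
--             m["total_fatal_serious_injury"] += 1
--     return metrics
-- ===== Notes on version B (the rewrite author's own statement) =====
-- stated objective: simpler
-- what changed: A first groups rows into per-FIPS lists and then rescans each group five times (len plus four generator sums); B makes a single pass over the rows keeping five running counters per FIPS, so no row lists are built and no group is rescanned.
import Mathlib
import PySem

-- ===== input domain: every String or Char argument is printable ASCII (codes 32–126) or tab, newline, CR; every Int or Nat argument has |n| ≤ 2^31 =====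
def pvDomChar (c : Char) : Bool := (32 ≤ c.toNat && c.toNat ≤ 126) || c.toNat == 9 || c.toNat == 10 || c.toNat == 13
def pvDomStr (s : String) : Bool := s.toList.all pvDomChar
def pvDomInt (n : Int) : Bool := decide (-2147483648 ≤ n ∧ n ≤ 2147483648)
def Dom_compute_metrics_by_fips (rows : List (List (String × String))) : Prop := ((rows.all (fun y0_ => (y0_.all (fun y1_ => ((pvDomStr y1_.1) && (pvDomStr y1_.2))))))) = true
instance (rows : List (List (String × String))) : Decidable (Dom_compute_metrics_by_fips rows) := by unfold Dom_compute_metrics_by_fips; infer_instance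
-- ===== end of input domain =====

-- B replaces A's group-rows-into-lists-then-rescan-each-group-five-times pass by a
-- single pass that keeps five running counters per FIPS (simpler decomposition).

-- shared helpers: row.get(k, "") and membership in _TRUTHY
def pvRowGet (row : List (String × String)) (k : String) : String :=
  (PySem.Dict.mk row).getD k ""

def pvTruthy (s : String) : Bool :=
  s == "Y" || s == "YES" || s == "1" || s == "TRUE" || s == "True" || s == "true"

-- ===== PORT A =====
-- the dict literal A assigns for one FIPS group (sum(1 for r in g if p(r)) = countP)
def pvEntryA (g : List (List (String × String))) : List (String × Int) :=
  [("total_crash", (g.length : Int)),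
   ("total_ped_crash", (g.countP (fun r => pvTruthy (pvRowGet r "Pedestrian?")) : Int)),
   ("total_bike_crash", (g.countP (fun r => pvTruthy (pvRowGet r "Bike?")) : Int)),
   ("total_fatal", (g.countP (fun r => PySem.Str.upper (pvRowGet r "Crash Severity") == "K") : Int)),
   ("total_fatal_serious_injury", (g.countP (fun r =>
      PySem.Str.upper (pvRowGet r "Crash Severity") == "K"
        || PySem.Str.upper (pvRowGet r "Crash Severity") == "A") : Int))]

-- body of A's first loop: by_fips[fips].append(row) guarded by 'if fips'
def pvStepA (d : PySem.Dict String (List (List (String × String))))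
    (row : List (String × String)) : PySem.Dict String (List (List (String × String))) :=
  let fips := PySem.Str.strip (pvRowGet row "FIPS")
  if fips ≠ "" then d.modify fips [] (· ++ [row]) else d

def compute_metrics_by_fips (rows : List (List (String × String))) : List (String × List (String × Int)) :=
  let by_fips := rows.foldl pvStepA PySem.Dict.empty
  -- metrics[fips] = {…}: the keys produced by by_fips.items are pairwise distinct,
  -- so each dict assignment appends a fresh entry
  by_fips.items.foldl (fun m p => m ++ [(p.1, pvEntryA p.2)]) []

-- ===== PORT B =====
-- the five-zero counter dict B creates on first sighting of a fips
def pvZeroEntry : PySem.Dict String Int :=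
  PySem.Dict.mk [("total_crash", 0), ("total_ped_crash", 0), ("total_bike_crash", 0),
                 ("total_fatal", 0), ("total_fatal_serious_injury", 0)]

-- B's per-row counter updates (m[k] += 1, key always present)
def pvBump (e : PySem.Dict String Int) (row : List (String × String)) : PySem.Dict String Int :=
  let e1 := e.modify "total_crash" 0 (· + 1)
  let e2 := if pvTruthy (pvRowGet row "Pedestrian?") then e1.modify "total_ped_crash" 0 (· + 1) else e1
  let e3 := if pvTruthy (pvRowGet row "Bike?") then e2.modify "total_bike_crash" 0 (· + 1) else e2
  let sev := PySem.Str.upper (pvRowGet row "Crash Severity")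
  let e4 := if sev == "K" then e3.modify "total_fatal" 0 (· + 1) else e3
  if sev == "K" || sev == "A" then e4.modify "total_fatal_serious_injury" 0 (· + 1) else e4

-- body of B's single loop (mutating the aliased inner dict = overwrite in place)
def pvStepB (m : PySem.Dict String (PySem.Dict String Int))
    (row : List (String × String)) : PySem.Dict String (PySem.Dict String Int) :=
  let fips := PySem.Str.strip (pvRowGet row "FIPS")
  if fips = "" then m
  else m.insert fips (pvBump (m.getD fips pvZeroEntry) row)

def compute_metrics_by_fips_alt (rows : List (List (String × String))) : List (String × List (String × Int)) :=
  ((rows.foldl pvStepB PySem.Dict.empty).items).map (fun p => (p.1, p.2.items))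

-- ===== PRECONDITION & SPEC =====
def Spec_compute_metrics_by_fips (rows : List (List (String × String))) (out : List (String × List (String × Int))) : Prop := out = compute_metrics_by_fips_alt rows
instance (rows : List (List (String × String))) (out : List (String × List (String × Int))) : Decidable (Spec_compute_metrics_by_fips rows out) := by unfold Spec_compute_metrics_by_fips; infer_instance

-- ===== CLAIM (what is proved, stated in full; the proofs are below) =====
def Claim_equal_compute_metrics_by_fips : Prop := ∀ (rows : List (List (String × String))), Dom_compute_metrics_by_fips rows → Spec_compute_metrics_by_fips rows (compute_metrics_by_fips rows)

-- ===== LEMMAS AND PROOFS =====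

-- the simulation map: one A-side group ↦ B's counter dict for that fips
def pvMapP (p : String × List (List (String × String))) : String × PySem.Dict String Int :=
  (p.1, PySem.Dict.mk (pvEntryA p.2))

lemma pvGet?_map (d : PySem.Dict String (List (List (String × String)))) (k : String) :
    (PySem.Dict.mk (d.items.map pvMapP)).get? k
      = (d.get? k).map (fun g => PySem.Dict.mk (pvEntryA g)) := by
  simp [PySem.Dict.get?, List.find?_map, Function.comp_def, pvMapP, Option.map_map]

lemma pvContains_map (d : PySem.Dict String (List (List (String × String)))) (k : String) :
    (PySem.Dict.mk (d.items.map pvMapP)).contains k = d.contains k := by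
  simp [PySem.Dict.contains, List.any_map, Function.comp_def, pvMapP]

lemma pvInsert_map (d : PySem.Dict String (List (List (String × String)))) (k : String)
    (g : List (List (String × String))) :
    (PySem.Dict.mk (d.items.map pvMapP)).insert k (PySem.Dict.mk (pvEntryA g))
      = PySem.Dict.mk ((d.insert k g).items.map pvMapP) := by
  simp only [PySem.Dict.insert, pvContains_map]
  by_cases h : d.contains k = true
  · simp only [h, if_pos, List.map_map]
    congr 1
    apply List.map_congr_left
    intro p _
    by_cases hp : p.1 = k <;> simp [pvMapP, hp]
  · simp [h, pvMapP]

-- pvBump on the literal five-key counter dict, computed key by key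
set_option maxHeartbeats 1000000 in
lemma pvBump_lit (a b c d e : Int) (row : List (String × String)) :
    pvBump (PySem.Dict.mk [("total_crash", a), ("total_ped_crash", b), ("total_bike_crash", c),
      ("total_fatal", d), ("total_fatal_serious_injury", e)]) row
    = PySem.Dict.mk [("total_crash", a + 1),
        ("total_ped_crash", b + (if pvTruthy (pvRowGet row "Pedestrian?") then 1 else 0)),
        ("total_bike_crash", c + (if pvTruthy (pvRowGet row "Bike?") then 1 else 0)),
        ("total_fatal", d + (if PySem.Str.upper (pvRowGet row "Crash Severity") == "K" then 1 else 0)),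
        ("total_fatal_serious_injury", e + (if (PySem.Str.upper (pvRowGet row "Crash Severity") == "K"
            || PySem.Str.upper (pvRowGet row "Crash Severity") == "A") then 1 else 0))] := by
  simp only [pvBump]
  split_ifs <;> simp_all [PySem.Dict.modify, PySem.Dict.insert, PySem.Dict.getD, PySem.Dict.get?,
    PySem.Dict.contains]

-- one B-side counter update = appending the row to the A-side group
lemma pvBump_entry (g : List (List (String × String))) (row : List (String × String)) :
    pvBump (PySem.Dict.mk (pvEntryA g)) row = PySem.Dict.mk (pvEntryA (g ++ [row])) := by
  show pvBump (PySem.Dict.mk [("total_crash", (g.length : Int)), ("total_ped_crash", _),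
    ("total_bike_crash", _), ("total_fatal", _), ("total_fatal_serious_injury", _)]) row = _
  rw [pvBump_lit]
  simp [pvEntryA, List.countP_append, List.countP_cons, List.countP_nil]

lemma pvStep_comm (d : PySem.Dict String (List (List (String × String))))
    (row : List (String × String)) :
    pvStepB (PySem.Dict.mk (d.items.map pvMapP)) row
      = PySem.Dict.mk ((pvStepA d row).items.map pvMapP) := by
  simp only [pvStepA, pvStepB]
  by_cases h : PySem.Str.strip (pvRowGet row "FIPS") = ""
  · simp [h]
  · simp only [h, ne_eq, not_false_eq_true, if_true, if_false]
    rw [PySem.Dict.modify]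
    rw [← pvInsert_map]
    congr 1
    rw [PySem.Dict.getD, PySem.Dict.getD, pvGet?_map]
    cases hg : d.get? (PySem.Str.strip (pvRowGet row "FIPS")) with
    | none =>
        simp only [Option.map_none, Option.getD_none]
        have : pvZeroEntry = PySem.Dict.mk (pvEntryA []) := by rfl
        rw [this, pvBump_entry]
    | some g =>
        simp only [Option.map_some, Option.getD_some]
        rw [pvBump_entry]

lemma pvInv (rows : List (List (String × String))) :
    rows.foldl pvStepB PySem.Dict.empty
      = PySem.Dict.mk ((rows.foldl pvStepA PySem.Dict.empty).items.map pvMapP) := by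
  induction rows using List.reverseRecOn with
  | nil => rfl
  | append_singleton rs row ih =>
      rw [List.foldl_append, List.foldl_append, List.foldl_cons, List.foldl_nil,
        List.foldl_cons, List.foldl_nil, ih, pvStep_comm]

-- ===== VERDICT (by name: the statement is the Claim_ definition above) =====
theorem compute_metrics_by_fips_spec : Claim_equal_compute_metrics_by_fips := by
  intro rows _
  unfold Spec_compute_metrics_by_fips compute_metrics_by_fips compute_metrics_by_fips_alt
  rw [pvInv]
  refine (PySem.List.foldl_append_singleton_eq_map
      (fun p => (p.1, pvEntryA p.2)) (List.foldl pvStepA PySem.Dict.empty rows).items []).trans ?_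
  simp [pvMapP, Function.comp_def]
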